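-- pv_equiv track=rewrite | github.com/0qp4/663 | RECTANGLE_M_sun.py | GenerateAndCountVariables
-- ===== SOURCE A (Python) =====
-- def GenerateAndCountVariables(Round,TotalProbability,Probability):
--     count_var_num = 0
--
--     xin = []
--     p = []
--     q = []
--     m = []
--     xout = []
--
--
--     for i in range(Round):
--         xin.append([])
--         p.append([])
--         q.append([])
--         m.append([])
--
--         for j in range(64):
--             count_var_num += 1
--             xin[i].append(count_var_num)
--
--         for j in range(16):
--             count_var_num += 1
--             p[i].append(count_var_num)
--             count_var_num += 1
--             q[i].append(count_var_num)
--             count_var_num += 1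
--             m[i].append(count_var_num)
--
--
--     for i in range(Round - 1):
--         xout.append([])
--         for j in range(64):
--             xout[i].append(xin[i + 1][j])
--     xout.append([])
--     for i in range(64):
--         count_var_num += 1
--         xout[Round - 1].append(count_var_num)
--
--
--     auxiliary_var_u = []
--     for r in range(0,Round):
--         auxiliary_var_u.append([])
--         for i in range(48):
--             if (r == (Round-1)) and (i ==47):
--                 continue
--             auxiliary_var_u[r].append([])
--             for j in range(Probability):
--                 count_var_num += 1
--                 auxiliary_var_u[r][i].append(count_var_num)
--
--     return(xin,xout,p,q,m,auxiliary_var_u,count_var_num)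
-- ===== SOURCE B (Python) =====
-- def GenerateAndCountVariables(Round, TotalProbability, Probability):
--     P = max(Probability, 0)
--     xin = [list(range(i*112 + 1, i*112 + 65)) for i in range(Round)]
--     p = [[i*112 + 64 + 3*j + 1 for j in range(16)] for i in range(Round)]
--     q = [[i*112 + 64 + 3*j + 2 for j in range(16)] for i in range(Round)]
--     m = [[i*112 + 64 + 3*j + 3 for j in range(16)] for i in range(Round)]
--     xout = [row[:] for row in xin[1:]] + [list(range(Round*112 + 1, Round*112 + 65))]
--     base = Round*112 + 64
--     aux = [[list(range(base + (r*48 + i)*P + 1, base + (r*48 + i)*P + P + 1))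
--             for i in range(47 if r == Round - 1 else 48)]
--            for r in range(Round)]
--     count = base + max(Round*48 - 1, 0)*P
--     return (xin, xout, p, q, m, aux, count)
-- ===== Notes on version B (the rewrite author's own statement) =====
-- stated objective: simpler
-- what changed: Replaces the single threaded count_var_num counter and all append loops by closed-form arithmetic: every block of consecutive IDs is produced directly as a range from its computed offset (xin[i] = range(i*112+1, i*112+65), p/q/m by stride-3 offsets, xout as a copy of xin[1:] plus one fresh range, aux blocks at base+(r*48+i)*P), and the final counter is the closed form base + max(Round*48-1,0)*P.
import Mathlib
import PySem

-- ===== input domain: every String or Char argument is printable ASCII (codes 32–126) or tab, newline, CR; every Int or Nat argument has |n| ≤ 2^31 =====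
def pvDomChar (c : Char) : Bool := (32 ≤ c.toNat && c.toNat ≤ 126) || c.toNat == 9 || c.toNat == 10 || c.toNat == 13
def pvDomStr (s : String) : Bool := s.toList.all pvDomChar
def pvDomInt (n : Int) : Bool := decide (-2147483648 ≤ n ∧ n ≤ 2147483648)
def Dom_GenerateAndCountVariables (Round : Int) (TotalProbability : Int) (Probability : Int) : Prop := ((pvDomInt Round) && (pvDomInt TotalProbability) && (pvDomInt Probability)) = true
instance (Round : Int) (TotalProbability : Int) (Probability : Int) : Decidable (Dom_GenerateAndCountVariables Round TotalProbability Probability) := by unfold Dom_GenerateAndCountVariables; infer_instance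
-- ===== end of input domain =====

-- B replaces the threaded count_var_num counter by closed-form offset arithmetic
-- (each ID block is a range computed from its offset); objective: simpler, same cost.


-- ===== PORT A =====
-- Literal transliteration of A: every Python loop is a foldl over the same pyRange,
-- threading the same (lists, count_var_num) state.  `xout[Round-1].append(c)` is ported
-- with pyGetD/pySetD (Python's signed indexing); under Pre_ (Round ≥ 0) the index always
-- resolves exactly as Python's does.
def GenerateAndCountVariables (Round : Int) (TotalProbability : Int) (Probability : Int) : List (List Int) × List (List Int) × List (List Int) × List (List Int) × List (List Int) × List (List (List Int)) × Int :=
  -- for i in range(Round): build xin[i], p[i], q[i], m[i]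
  let s1 := (PySem.List.pyRange 0 Round 1).foldl
    (fun (s : List (List Int) × List (List Int) × List (List Int) × List (List Int) × Int) _i =>
      -- for j in range(64): count += 1; xin[i].append(count)
      let t1 := (PySem.List.pyRange 0 64 1).foldl
        (fun (t : List Int × Int) _j => (t.1 ++ [t.2 + 1], t.2 + 1)) ([], s.2.2.2.2)
      -- for j in range(16): three count += 1 / append steps for p, q, m
      let t2 := (PySem.List.pyRange 0 16 1).foldl
        (fun (t : List Int × List Int × List Int × Int) _j =>
          (t.1 ++ [t.2.2.2 + 1], t.2.1 ++ [t.2.2.2 + 2], t.2.2.1 ++ [t.2.2.2 + 3], t.2.2.2 + 3))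
        ([], [], [], t1.2)
      (s.1 ++ [t1.1], s.2.1 ++ [t2.1], s.2.2.1 ++ [t2.2.1], s.2.2.2.1 ++ [t2.2.2.1], t2.2.2.2))
    ([], [], [], [], 0)
  let xin := s1.1
  -- for i in range(Round - 1): xout.append([]); for j in range(64): xout[i].append(xin[i+1][j])
  let xout1 := (PySem.List.pyRange 0 (Round - 1) 1).foldl
    (fun (acc : List (List Int)) i =>
      acc ++ [(PySem.List.pyRange 0 64 1).foldl
        (fun (row : List Int) j => row ++ [PySem.List.pyGetD (PySem.List.pyGetD xin (i + 1) []) j 0]) []])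
    []
  -- xout.append([])
  let xout2 := xout1 ++ [[]]
  -- for i in range(64): count += 1; xout[Round-1].append(count)
  let t3 := (PySem.List.pyRange 0 64 1).foldl
    (fun (t : List (List Int) × Int) _i =>
      (PySem.List.pySetD t.1 (Round - 1) (PySem.List.pyGetD t.1 (Round - 1) [] ++ [t.2 + 1]), t.2 + 1))
    (xout2, s1.2.2.2.2)
  -- for r in range(0, Round): auxiliary_var_u.append([]); for i in range(48): …
  let t4 := (PySem.List.pyRange 0 Round 1).foldl
    (fun (t : List (List (List Int)) × Int) r =>
      let inner := (PySem.List.pyRange 0 48 1).foldl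
        (fun (u : List (List Int) × Int) i =>
          if r == Round - 1 && i == 47 then u    -- continue
          else
            -- for j in range(Probability): count += 1; append(count)
            let blk := (PySem.List.pyRange 0 Probability 1).foldl
              (fun (v : List Int × Int) _j => (v.1 ++ [v.2 + 1], v.2 + 1)) ([], u.2)
            (u.1 ++ [blk.1], blk.2))
        ([], t.2)
      (t.1 ++ [inner.1], inner.2))
    ([], t3.2)
  (xin, t3.1, s1.2.1, s1.2.2.1, s1.2.2.2.1, t4.1, t4.2)

-- ===== PORT B =====
-- Literal transliteration of Source B: closed-form ranges per block, no running counter.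
def GenerateAndCountVariables_alt (Round : Int) (TotalProbability : Int) (Probability : Int) : List (List Int) × List (List Int) × List (List Int) × List (List Int) × List (List Int) × List (List (List Int)) × Int :=
  let P := max Probability 0
  let rs := PySem.List.pyRange 0 Round 1
  let xin := rs.map (fun i => PySem.List.pyRange (i * 112 + 1) (i * 112 + 65) 1)
  let p := rs.map (fun i => (PySem.List.pyRange 0 16 1).map (fun j => i * 112 + 64 + 3 * j + 1))
  let q := rs.map (fun i => (PySem.List.pyRange 0 16 1).map (fun j => i * 112 + 64 + 3 * j + 2))
  let m := rs.map (fun i => (PySem.List.pyRange 0 16 1).map (fun j => i * 112 + 64 + 3 * j + 3))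
  -- xout = [row[:] for row in xin[1:]] + [list(range(Round*112+1, Round*112+65))]
  let xout := (PySem.List.slice xin (some 1) none).map (fun row => PySem.List.slice row none none)
    ++ [PySem.List.pyRange (Round * 112 + 1) (Round * 112 + 65) 1]
  let base := Round * 112 + 64
  let aux := rs.map (fun r =>
    (PySem.List.pyRange 0 (if r == Round - 1 then 47 else 48) 1).map
      (fun i => PySem.List.pyRange (base + (r * 48 + i) * P + 1) (base + (r * 48 + i) * P + P + 1) 1))
  let count := base + max (Round * 48 - 1) 0 * P
  (xin, xout, p, q, m, aux, count)

-- ===== PRECONDITION & SPEC =====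
-- Pre_ excludes Round < 0, where Python A raises IndexError (xout[Round-1] with len(xout) == 1
-- resolves below -len); A returns normally exactly when Round ≥ 0.
def Pre_GenerateAndCountVariables (Round : Int) (TotalProbability : Int) (Probability : Int) : Prop := 0 ≤ Round
instance (Round : Int) (TotalProbability : Int) (Probability : Int) : Decidable (Pre_GenerateAndCountVariables Round TotalProbability Probability) := by unfold Pre_GenerateAndCountVariables; infer_instance
def pvWitness_GenerateAndCountVariables : Int × Int × Int := (2, 0, 1)
def Spec_GenerateAndCountVariables (Round : Int) (TotalProbability : Int) (Probability : Int) (out : List (List Int) × List (List Int) × List (List Int) × List (List Int) × List (List Int) × List (List (List Int)) × Int) : Prop := out = GenerateAndCountVariables_alt Round TotalProbability Probability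
instance (Round : Int) (TotalProbability : Int) (Probability : Int) (out : List (List Int) × List (List Int) × List (List Int) × List (List Int) × List (List Int) × List (List (List Int)) × Int) : Decidable (Spec_GenerateAndCountVariables Round TotalProbability Probability out) := by
  unfold Spec_GenerateAndCountVariables
  obtain ⟨a1, a2, a3, a4, a5, a6, a7⟩ := out
  obtain ⟨b1, b2, b3, b4, b5, b6, b7⟩ := GenerateAndCountVariables_alt Round TotalProbability Probability
  simp only [Prod.mk.injEq]
  infer_instance

-- ===== CLAIM (what is proved, stated in full; the proofs are below) =====
def Claim_equal_GenerateAndCountVariables : Prop := ∀ (Round : Int) (TotalProbability : Int) (Probability : Int), Dom_GenerateAndCountVariables Round TotalProbability Probability → Pre_GenerateAndCountVariables Round TotalProbability Probability → Spec_GenerateAndCountVariables Round TotalProbability Probability (GenerateAndCountVariables Round TotalProbability Probability)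

-- ===== LEMMAS AND PROOFS =====

lemma shift_range_map (c : Int) (n : Nat) :
    (c + 1) :: (List.range n).map (fun (j : Nat) => c + 1 + ((j:Int) + 1))
    = (List.range (n + 1)).map (fun (j : Nat) => c + ((j:Int) + 1)) := by
  rw [List.range_succ_eq_map, List.map_cons, List.map_map]
  simp only [Nat.cast_zero, List.cons.injEq]
  refine ⟨by ring, ?_⟩
  apply List.map_congr_left
  intro a _
  simp only [Function.comp_apply]
  push_cast
  ring

lemma foldA_consec {γ : Type} (l : List γ) (c : Int) (acc : List Int) :
    l.foldl (fun (t : List Int × Int) _ => (t.1 ++ [t.2 + 1], t.2 + 1)) (acc, c)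
    = (acc ++ (List.range l.length).map (fun (j : Nat) => c + ((j:Int) + 1)), c + l.length) := by
  induction l generalizing c acc with
  | nil => simp
  | cons x xs ih =>
    rw [List.foldl_cons, ih]
    simp only [Prod.mk.injEq, List.length_cons]
    refine ⟨?_, by push_cast; ring⟩
    rw [List.append_assoc]
    congr 1
    rw [List.singleton_append, shift_range_map]

lemma shift3_range_map (c o : Int) (n : Nat) :
    (c + o) :: (List.range n).map (fun (j : Nat) => c + 3 + 3*(j:Int) + o)
    = (List.range (n + 1)).map (fun (j : Nat) => c + 3*(j:Int) + o) := by
  rw [List.range_succ_eq_map, List.map_cons, List.map_map]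
  simp only [Nat.cast_zero, List.cons.injEq]
  refine ⟨by ring, ?_⟩
  apply List.map_congr_left
  intro a _
  simp only [Function.comp_apply]
  push_cast
  ring

lemma foldA_pqm {γ : Type} (l : List γ) (c : Int) (a1 a2 a3 : List Int) :
    l.foldl (fun (t : List Int × List Int × List Int × Int) _ =>
      (t.1 ++ [t.2.2.2 + 1], t.2.1 ++ [t.2.2.2 + 2], t.2.2.1 ++ [t.2.2.2 + 3], t.2.2.2 + 3))
      (a1, a2, a3, c)
    = (a1 ++ (List.range l.length).map (fun (j : Nat) => c + 3*(j:Int) + 1),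
       a2 ++ (List.range l.length).map (fun (j : Nat) => c + 3*(j:Int) + 2),
       a3 ++ (List.range l.length).map (fun (j : Nat) => c + 3*(j:Int) + 3),
       c + 3 * l.length) := by
  induction l generalizing c a1 a2 a3 with
  | nil => simp
  | cons x xs ih =>
    rw [List.foldl_cons, ih]
    simp only [Prod.mk.injEq, List.length_cons]
    refine ⟨?_, ?_, ?_, by push_cast; ring⟩ <;>
    · rw [List.append_assoc]
      congr 1
      rw [List.singleton_append]
      convert shift3_range_map c _ xs.length using 3

lemma range_map_eq_pyRange (c : Int) (n : Nat) :
    (List.range n).map (fun (j : Nat) => c + ((j:Int) + 1)) = PySem.List.pyRange (c+1) (c+1+n) 1 := by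
  rw [PySem.List.pyRange_one]
  simp only [add_sub_cancel_left, Int.toNat_natCast]
  apply List.map_congr_left
  intro a _
  ring

lemma xin_row (c : Int) :
    (List.range 64).map (fun (j : Nat) => c + ((j:Int) + 1)) = PySem.List.pyRange (c+1) (c+65) 1 := by
  rw [show (c + 65 : Int) = c + 1 + ((64:Nat):Int) by push_cast; ring]
  exact range_map_eq_pyRange c 64

lemma pyRange_map_cast {α : Type} (n : Nat) (f : Int → α) :
    (PySem.List.pyRange 0 (n:Int) 1).map f = (List.range n).map (fun (i : Nat) => f (i:Int)) := by
  rw [PySem.List.pyRange_one]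
  simp [List.map_map, Function.comp]

set_option maxHeartbeats 1000000 in
lemma loop1_eq (n : Nat) :
    (PySem.List.pyRange 0 (n:Int) 1).foldl
      (fun (s : List (List Int) × List (List Int) × List (List Int) × List (List Int) × Int) _i =>
        let t1 := (PySem.List.pyRange 0 64 1).foldl
          (fun (t : List Int × Int) _j => (t.1 ++ [t.2 + 1], t.2 + 1)) ([], s.2.2.2.2)
        let t2 := (PySem.List.pyRange 0 16 1).foldl
          (fun (t : List Int × List Int × List Int × Int) _j =>
            (t.1 ++ [t.2.2.2 + 1], t.2.1 ++ [t.2.2.2 + 2], t.2.2.1 ++ [t.2.2.2 + 3], t.2.2.2 + 3))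
          ([], [], [], t1.2)
        (s.1 ++ [t1.1], s.2.1 ++ [t2.1], s.2.2.1 ++ [t2.2.1], s.2.2.2.1 ++ [t2.2.2.1], t2.2.2.2))
      ([], [], [], [], 0)
    = ((List.range n).map (fun (i : Nat) => PySem.List.pyRange ((i:Int)*112+1) ((i:Int)*112+65) 1),
       (List.range n).map (fun (i : Nat) => (List.range 16).map (fun (j : Nat) => (i:Int)*112 + 64 + 3*(j:Int) + 1)),
       (List.range n).map (fun (i : Nat) => (List.range 16).map (fun (j : Nat) => (i:Int)*112 + 64 + 3*(j:Int) + 2)),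
       (List.range n).map (fun (i : Nat) => (List.range 16).map (fun (j : Nat) => (i:Int)*112 + 64 + 3*(j:Int) + 3)),
       (n:Int) * 112) := by
  have h64 : (PySem.List.pyRange 0 64 1).length = 64 := by
    rw [PySem.List.length_pyRange_one]; decide
  have h16 : (PySem.List.pyRange 0 16 1).length = 16 := by
    rw [PySem.List.length_pyRange_one]; decide
  induction n with
  | zero =>
    rw [Nat.cast_zero, PySem.List.pyRange_one_eq_nil le_rfl]
    simp
  | succ n ih =>
    have hsplit : PySem.List.pyRange 0 ((n+1:Nat):Int) 1
        = PySem.List.pyRange 0 (n:Int) 1 ++ [(n:Int)] := by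
      push_cast
      exact PySem.List.pyRange_one_succ_right (by positivity)
    rw [hsplit, List.foldl_append, ih]
    simp only [List.foldl_cons, List.foldl_nil]
    rw [foldA_consec, foldA_pqm, h64, h16]
    rw [List.range_succ (n := n)]
    simp only [Prod.mk.injEq, List.map_append, List.map_singleton, List.nil_append]
    refine ⟨?_, ?_, ?_, ?_, ?_⟩
    · rw [xin_row]
    · rfl
    · rfl
    · rfl
    · push_cast; ring

-- generic "append to the list at resolved-last index" fill loop
lemma fill_last {γ : Type} (idx : Int)
    (hget : ∀ (pre : List (List Int)) (cur : List Int), pre.length + 1 = LEN → PySem.List.pyGetD (pre ++ [cur]) idx [] = cur)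
    (hset : ∀ (pre : List (List Int)) (cur v : List Int), pre.length + 1 = LEN → PySem.List.pySetD (pre ++ [cur]) idx v = pre ++ [v])
    (l : List γ) (pre : List (List Int)) (cur : List Int) (c : Int) (hlen : pre.length + 1 = LEN) :
    l.foldl (fun (t : List (List Int) × Int) _ =>
        (PySem.List.pySetD t.1 idx (PySem.List.pyGetD t.1 idx [] ++ [t.2 + 1]), t.2 + 1))
      (pre ++ [cur], c)
    = (pre ++ [cur ++ (List.range l.length).map (fun (j : Nat) => c + ((j:Int) + 1))], c + l.length) := by
  induction l generalizing cur c with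
  | nil => simp
  | cons x xs ih =>
    rw [List.foldl_cons, hget pre cur hlen, hset pre cur _ hlen, ih (cur ++ [c + 1]) (c + 1)]
    simp only [Prod.mk.injEq, List.length_cons]
    refine ⟨?_, by push_cast; ring⟩
    rw [List.append_assoc, List.singleton_append, shift_range_map]

lemma aux_slots (Probability : Int) (m : Nat) (blks : List (List Int)) (c : Int) :
    (PySem.List.pyRange 0 (m:Int) 1).foldl
      (fun (u : List (List Int) × Int) _i =>
        let blk := (PySem.List.pyRange 0 Probability 1).foldl
          (fun (v : List Int × Int) _j => (v.1 ++ [v.2 + 1], v.2 + 1)) ([], u.2)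
        (u.1 ++ [blk.1], blk.2))
      (blks, c)
    = (blks ++ (List.range m).map (fun (k : Nat) =>
          (List.range Probability.toNat).map (fun (j : Nat) =>
            c + (k:Int) * (max Probability 0) + ((j:Int) + 1))),
       c + (m:Int) * (max Probability 0)) := by
  have hP : (PySem.List.pyRange 0 Probability 1).length = Probability.toNat := by
    rw [PySem.List.length_pyRange_one, sub_zero]
  induction m with
  | zero =>
    rw [Nat.cast_zero, PySem.List.pyRange_one_eq_nil le_rfl]
    simp
  | succ m ih =>
    have hsplit : PySem.List.pyRange 0 ((m+1:Nat):Int) 1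
        = PySem.List.pyRange 0 (m:Int) 1 ++ [(m:Int)] := by
      push_cast
      exact PySem.List.pyRange_one_succ_right (by positivity)
    rw [hsplit, List.foldl_append, ih]
    simp only [List.foldl_cons, List.foldl_nil]
    rw [foldA_consec, hP]
    simp only [Prod.mk.injEq]
    rw [List.range_succ (n := m)]
    simp only [List.map_append, List.map_singleton, List.nil_append]
    refine ⟨?_, by push_cast [Int.toNat_eq_max]; ring⟩
    rw [List.append_assoc]

lemma aux_outer (Probability : Int) (m : Nat) (acc : List (List (List Int))) (c : Int) :
    (PySem.List.pyRange 0 (m:Int) 1).foldl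
      (fun (t : List (List (List Int)) × Int) _r =>
        let inner := (PySem.List.pyRange 0 48 1).foldl
          (fun (u : List (List Int) × Int) _i =>
            let blk := (PySem.List.pyRange 0 Probability 1).foldl
              (fun (v : List Int × Int) _j => (v.1 ++ [v.2 + 1], v.2 + 1)) ([], u.2)
            (u.1 ++ [blk.1], blk.2))
          ([], t.2)
        (t.1 ++ [inner.1], inner.2))
      (acc, c)
    = (acc ++ (List.range m).map (fun (rk : Nat) =>
        (List.range 48).map (fun (k : Nat) =>
          (List.range Probability.toNat).map (fun (j : Nat) =>
            c + (rk:Int)*48*(max Probability 0) + (k:Int)*(max Probability 0) + ((j:Int)+1)))),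
       c + (m:Int)*48*(max Probability 0)) := by
  have h48 : ∀ (blks : List (List Int)) (c0 : Int),
      (PySem.List.pyRange 0 48 1).foldl
        (fun (u : List (List Int) × Int) _i =>
          let blk := (PySem.List.pyRange 0 Probability 1).foldl
            (fun (v : List Int × Int) _j => (v.1 ++ [v.2 + 1], v.2 + 1)) ([], u.2)
          (u.1 ++ [blk.1], blk.2))
        (blks, c0)
      = (blks ++ (List.range 48).map (fun (k : Nat) =>
          (List.range Probability.toNat).map (fun (j : Nat) =>
            c0 + (k:Int) * (max Probability 0) + ((j:Int) + 1))),
         c0 + 48 * (max Probability 0)) := by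
    intro blks c0
    have := aux_slots Probability 48 blks c0
    norm_num at this
    convert this using 2
  induction m with
  | zero =>
    rw [Nat.cast_zero, PySem.List.pyRange_one_eq_nil le_rfl]
    simp
  | succ m ih =>
    have hsplit : PySem.List.pyRange 0 ((m+1:Nat):Int) 1
        = PySem.List.pyRange 0 (m:Int) 1 ++ [(m:Int)] := by
      push_cast
      exact PySem.List.pyRange_one_succ_right (by positivity)
    rw [hsplit, List.foldl_append, ih]
    simp only [List.foldl_cons, List.foldl_nil]
    rw [h48]
    simp only [Prod.mk.injEq]
    rw [List.range_succ (n := m)]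
    simp only [List.map_append, List.map_singleton, List.nil_append]
    refine ⟨?_, by push_cast; ring⟩
    rw [List.append_assoc]

lemma pyRange_congr (a b a' b' : Int) (h1 : a = a') (h2 : b = b') :
    PySem.List.pyRange a b 1 = PySem.List.pyRange a' b' 1 := by rw [h1, h2]

lemma blk_eq (s Probability : Int) :
    (List.range Probability.toNat).map (fun (j : Nat) => s + ((j:Int) + 1))
    = PySem.List.pyRange (s + 1) (s + max Probability 0 + 1) 1 := by
  rw [show s + max Probability 0 + 1 = s + 1 + ((Probability.toNat : Nat) : Int) by
    rw [Int.toNat_eq_max]; ring]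
  exact range_map_eq_pyRange s _

lemma map_shift {α : Type} (b : Int) (f : Int → α) :
    (PySem.List.pyRange 1 b 1).map f = (PySem.List.pyRange 0 (b - 1) 1).map (fun i => f (i + 1)) := by
  rw [PySem.List.pyRange_one, PySem.List.pyRange_one]
  rw [show b - 1 - 0 = b - 1 by ring]
  rw [List.map_map, List.map_map]
  apply List.map_congr_left
  intro a _
  simp only [Function.comp_apply]
  congr 1
  ring

lemma aux_skiprow (Probability e : Int) (blks : List (List Int)) (c : Int) :
    (PySem.List.pyRange 0 48 1).foldl
      (fun (u : List (List Int) × Int) i =>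
        if e == e && i == 47 then u
        else
          let blk := (PySem.List.pyRange 0 Probability 1).foldl
            (fun (v : List Int × Int) _j => (v.1 ++ [v.2 + 1], v.2 + 1)) ([], u.2)
          (u.1 ++ [blk.1], blk.2))
      (blks, c)
    = (blks ++ (List.range 47).map (fun (k : Nat) =>
        (List.range Probability.toNat).map (fun (j : Nat) =>
          c + (k:Int) * (max Probability 0) + ((j:Int) + 1))),
       c + 47 * (max Probability 0)) := by
  have hsplit : PySem.List.pyRange 0 48 1 = PySem.List.pyRange 0 47 1 ++ [(47:Int)] := by
    rw [show (48:Int) = 47 + 1 by norm_num]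
    exact PySem.List.pyRange_one_succ_right (by norm_num)
  rw [hsplit, List.foldl_append]
  have hcongr := PySem.List.foldl_congr_mem (PySem.List.pyRange 0 47 1)
      (fun (u : List (List Int) × Int) i =>
        if e == e && i == 47 then u
        else
          let blk := (PySem.List.pyRange 0 Probability 1).foldl
            (fun (v : List Int × Int) _j => (v.1 ++ [v.2 + 1], v.2 + 1)) ([], u.2)
          (u.1 ++ [blk.1], blk.2))
      (fun (u : List (List Int) × Int) _i =>
        let blk := (PySem.List.pyRange 0 Probability 1).foldl
          (fun (v : List Int × Int) _j => (v.1 ++ [v.2 + 1], v.2 + 1)) ([], u.2)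
        (u.1 ++ [blk.1], blk.2))
      (blks, c)
      (by
        intro acc x hx
        have hx47 : x < 47 := (PySem.List.mem_pyRange_one.mp hx).2
        have hb : (x == 47) = false := by simp; omega
        simp only [hb, Bool.and_false, Bool.false_eq_true, if_false])
  rw [hcongr]
  have h47 := aux_slots Probability 47 blks c
  norm_num at h47
  rw [h47]
  simp only [List.foldl_cons, List.foldl_nil]
  have : ((47:Int) == 47) = true := by decide
  simp only [this, beq_self_eq_true, Bool.and_self, if_true]

lemma xout_prefix (n : Nat) :
    (PySem.List.pyRange 0 ((n:Int) - 1) 1).foldl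
      (fun (acc : List (List Int)) i =>
        acc ++ [(PySem.List.pyRange 0 64 1).foldl
          (fun (row : List Int) j =>
            row ++ [PySem.List.pyGetD
              (PySem.List.pyGetD
                ((PySem.List.pyRange 0 (n:Int) 1).map
                  (fun i' => PySem.List.pyRange (i' * 112 + 1) (i' * 112 + 65) 1)) (i + 1) [])
              j 0]) []])
      []
    = (PySem.List.pyRange 0 ((n:Int) - 1) 1).map
        (fun i => PySem.List.pyRange ((i + 1) * 112 + 1) ((i + 1) * 112 + 65) 1) := by
  rw [PySem.List.foldl_append_singleton_eq_map]
  rw [List.nil_append]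
  apply List.map_congr_left
  intro i hi
  obtain ⟨hi0, hi1⟩ := PySem.List.mem_pyRange_one.mp hi
  rw [PySem.List.foldl_append_singleton_eq_map, List.nil_append]
  rw [PySem.List.pyGetD_map_pyRange_of_nonneg _ _ _ _ (by omega) (by omega)]
  have hlen : ((PySem.List.pyRange ((i + 1) * 112 + 1) ((i + 1) * 112 + 65) 1).length : Int) = 64 := by
    rw [PySem.List.length_pyRange_one]
    rw [show (i + 1) * 112 + 65 - ((i + 1) * 112 + 1) = 64 by ring]
    norm_num
  rw [show (64:Int) = ((PySem.List.pyRange ((i + 1) * 112 + 1) ((i + 1) * 112 + 65) 1).length : Int) from hlen.symm]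
  exact PySem.List.map_pyGetD_pyRange_zero' _ _

lemma aux_outer_skip (Probability E : Int) (m : Nat)
    (hE : ∀ x ∈ PySem.List.pyRange 0 (m:Int) 1, (x == E) = false)
    (acc : List (List (List Int))) (c : Int) :
    (PySem.List.pyRange 0 (m:Int) 1).foldl
      (fun (t : List (List (List Int)) × Int) r =>
        let inner := (PySem.List.pyRange 0 48 1).foldl
          (fun (u : List (List Int) × Int) i =>
            if r == E && i == 47 then u
            else
              let blk := (PySem.List.pyRange 0 Probability 1).foldl
                (fun (v : List Int × Int) _j => (v.1 ++ [v.2 + 1], v.2 + 1)) ([], u.2)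
              (u.1 ++ [blk.1], blk.2))
          ([], t.2)
        (t.1 ++ [inner.1], inner.2))
      (acc, c)
    = (acc ++ (List.range m).map (fun (rk : Nat) =>
        (List.range 48).map (fun (k : Nat) =>
          (List.range Probability.toNat).map (fun (j : Nat) =>
            c + (rk:Int)*48*(max Probability 0) + (k:Int)*(max Probability 0) + ((j:Int)+1)))),
       c + (m:Int)*48*(max Probability 0)) := by
  rw [PySem.List.foldl_congr_mem _ _
      (fun (t : List (List (List Int)) × Int) _r =>
        let inner := (PySem.List.pyRange 0 48 1).foldl
          (fun (u : List (List Int) × Int) _i =>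
            let blk := (PySem.List.pyRange 0 Probability 1).foldl
              (fun (v : List Int × Int) _j => (v.1 ++ [v.2 + 1], v.2 + 1)) ([], u.2)
            (u.1 ++ [blk.1], blk.2))
          ([], t.2)
        (t.1 ++ [inner.1], inner.2)) _
      (by
        intro acc' x hx
        have hb := hE x hx
        simp only [hb, Bool.false_and, Bool.false_eq_true, if_false])]
  exact aux_outer Probability m acc c

lemma loop1_eq' (n : Nat) :
    (PySem.List.pyRange 0 (n:Int) 1).foldl
      (fun (s : List (List Int) × List (List Int) × List (List Int) × List (List Int) × Int) _i =>
        let t1 := (PySem.List.pyRange 0 64 1).foldl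
          (fun (t : List Int × Int) _j => (t.1 ++ [t.2 + 1], t.2 + 1)) ([], s.2.2.2.2)
        let t2 := (PySem.List.pyRange 0 16 1).foldl
          (fun (t : List Int × List Int × List Int × Int) _j =>
            (t.1 ++ [t.2.2.2 + 1], t.2.1 ++ [t.2.2.2 + 2], t.2.2.1 ++ [t.2.2.2 + 3], t.2.2.2 + 3))
          ([], [], [], t1.2)
        (s.1 ++ [t1.1], s.2.1 ++ [t2.1], s.2.2.1 ++ [t2.2.1], s.2.2.2.1 ++ [t2.2.2.1], t2.2.2.2))
      ([], [], [], [], 0)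
    = ((PySem.List.pyRange 0 (n:Int) 1).map (fun i => PySem.List.pyRange (i * 112 + 1) (i * 112 + 65) 1),
       (PySem.List.pyRange 0 (n:Int) 1).map (fun i => (PySem.List.pyRange 0 16 1).map (fun j => i * 112 + 64 + 3 * j + 1)),
       (PySem.List.pyRange 0 (n:Int) 1).map (fun i => (PySem.List.pyRange 0 16 1).map (fun j => i * 112 + 64 + 3 * j + 2)),
       (PySem.List.pyRange 0 (n:Int) 1).map (fun i => (PySem.List.pyRange 0 16 1).map (fun j => i * 112 + 64 + 3 * j + 3)),
       (n:Int) * 112) := by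
  rw [loop1_eq]
  simp only [Prod.mk.injEq]
  refine ⟨?_, ?_, ?_, ?_, trivial⟩ <;>
  · rw [pyRange_map_cast]
    try
      apply List.map_congr_left
      intro i _
      rw [show (16:Int) = ((16:Nat):Int) from rfl, pyRange_map_cast]

lemma aux_row_eq (c Probability : Int) (m : Nat) (base r48 : Int)
    (hc : c = base + r48 * (max Probability 0)) :
    (List.range m).map (fun (k : Nat) =>
      (List.range Probability.toNat).map (fun (j : Nat) =>
        c + (k:Int) * (max Probability 0) + ((j:Int) + 1)))
    = (PySem.List.pyRange 0 (m:Int) 1).map (fun i =>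
        PySem.List.pyRange (base + (r48 + i) * (max Probability 0) + 1)
          (base + (r48 + i) * (max Probability 0) + (max Probability 0) + 1) 1) := by
  rw [pyRange_map_cast]
  apply List.map_congr_left
  intro k _
  rw [blk_eq]
  exact pyRange_congr _ _ _ _ (by rw [hc]; ring) (by rw [hc]; ring)

lemma map_range_last {α : Type} (n : Nat) (hn : 1 ≤ n) (f : Nat → α) :
    (List.range n).map f = (List.range (n-1)).map f ++ [f (n-1)] := by
  conv_lhs => rw [show n = (n-1)+1 by omega]
  rw [List.range_succ, List.map_append, List.map_singleton]


set_option maxHeartbeats 2000000 in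
theorem main_eq (Round TP Prob : Int) (hpre : 0 ≤ Round) :
    GenerateAndCountVariables Round TP Prob = GenerateAndCountVariables_alt Round TP Prob := by
  obtain ⟨n, rfl⟩ : ∃ n : Nat, Round = (n:Int) := ⟨Round.toNat, (Int.toNat_of_nonneg hpre).symm⟩
  simp only [GenerateAndCountVariables, GenerateAndCountVariables_alt]
  rw [loop1_eq']
  rw [xout_prefix n]
  dsimp only
  -- resolve the xout[Round-1] fill loop
  have h64 : (PySem.List.pyRange 0 64 1).length = 64 := by
    rw [PySem.List.length_pyRange_one]; decide
  have hPRE : (List.map (fun i => PySem.List.pyRange ((i + 1) * 112 + 1) ((i + 1) * 112 + 65) 1)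
      (PySem.List.pyRange 0 ((n:Int) - 1) 1)).length = n - 1 := by
    rw [List.length_map, PySem.List.length_pyRange_one]
    omega
  have hfill : List.foldl
      (fun (t : List (List Int) × Int) _i =>
        (PySem.List.pySetD t.1 ((n:Int) - 1) (PySem.List.pyGetD t.1 ((n:Int) - 1) [] ++ [t.2 + 1]), t.2 + 1))
      (List.map (fun i => PySem.List.pyRange ((i + 1) * 112 + 1) ((i + 1) * 112 + 65) 1)
          (PySem.List.pyRange 0 ((n:Int) - 1) 1) ++ [[]], (n:Int) * 112)
      (PySem.List.pyRange 0 64 1)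
      = (List.map (fun i => PySem.List.pyRange ((i + 1) * 112 + 1) ((i + 1) * 112 + 65) 1)
          (PySem.List.pyRange 0 ((n:Int) - 1) 1) ++ [PySem.List.pyRange ((n:Int) * 112 + 1) ((n:Int) * 112 + 65) 1],
         (n:Int) * 112 + 64) := by
    have := fill_last (LEN := n - 1 + 1) ((n:Int) - 1)
      (by
        intro pre cur hlen
        by_cases hn : n = 0
        · subst hn
          obtain rfl : pre = [] := List.eq_nil_of_length_eq_zero (by omega)
          rw [show ((0:Nat):Int) - 1 = -1 by norm_num, List.nil_append]
          simp [pysem]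
        · rw [show ((n:Int) - 1) = ((pre.length : Nat) : Int) by omega,
            PySem.List.pyGetD_natCast]
          simp [List.getD]
      )
      (by
        intro pre cur v hlen
        by_cases hn : n = 0
        · subst hn
          obtain rfl : pre = [] := List.eq_nil_of_length_eq_zero (by omega)
          rw [show ((0:Nat):Int) - 1 = -1 by norm_num, List.nil_append]
          simp [PySem.List.pySetD, PySem.List.pySet?, PySem.List.pyIdx?]
        · rw [show ((n:Int) - 1) = ((pre.length : Nat) : Int) by omega,
            PySem.List.pySetD_natCast, List.set_append_right _ _ (le_refl _)]
          simp
      )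
      (PySem.List.pyRange 0 64 1) _ [] ((n:Int) * 112) (by rw [hPRE])
    rw [this, List.nil_append, h64, xin_row]
    norm_num
  rw [hfill]
  dsimp only
  by_cases hn : n = 0
  · subst hn
    norm_num [PySem.List.pyRange_one_eq_nil, PySem.List.slice_from_one]
  · have hn1 : 1 ≤ n := by omega
    have hcast : ((n:Int) - 1) = ((n - 1 : Nat) : Int) := by omega
    rw [hcast]
    have hsplitn : PySem.List.pyRange 0 (n:Int) 1
        = PySem.List.pyRange 0 ((n-1:Nat):Int) 1 ++ [((n-1:Nat):Int)] := by
      rw [PySem.List.pyRange_one_append 0 ((n-1:Nat):Int) (n:Int) (by omega) (by omega)]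
      congr 1
      rw [show ((n:Int)) = ((n-1:Nat):Int) + 1 by omega]
      exact PySem.List.pyRange_one_singleton _
    simp only [Prod.mk.injEq]
    refine ⟨trivial, ?_, trivial, trivial, trivial, ?_, ?_⟩
    · -- xout
      have htail : (PySem.List.pyRange 0 (n:Int) 1).tail = PySem.List.pyRange 1 (n:Int) 1 := by
        rw [PySem.List.pyRange_one_cons (by omega : (0:Int) < (n:Int))]
        rfl
      rw [PySem.List.slice_from_one, ← List.map_tail, htail, map_shift, hcast]
      simp only [PySem.List.slice_none_none, List.map_id']
    · -- auxiliary_var_u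
      rw [pyRange_map_cast, map_range_last n hn1, hsplitn, List.foldl_append]
      rw [aux_outer_skip Prob ((n-1:Nat):Int) (n-1)
        (by
          intro x hx
          obtain ⟨_, hx2⟩ := PySem.List.mem_pyRange_one.mp hx
          rw [beq_eq_false_iff_ne]
          omega)]
      simp only [List.foldl_cons, List.foldl_nil, List.nil_append]
      rw [aux_skiprow]
      congr 1
      · apply List.map_congr_left
        intro rk hrk
        have hrklt : rk < n - 1 := List.mem_range.mp hrk
        have hfalse : (((rk:Nat):Int) == ((n-1:Nat):Int)) = false := by
          rw [beq_eq_false_iff_ne]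
          omega
        simp only [hfalse, Bool.false_eq_true, if_false]
        rw [show (48:Int) = ((48:Nat):Int) from rfl]
        exact aux_row_eq _ Prob 48 ((n:Int) * 112 + 64) ((rk:Int) * 48) (by ring)
      · have htrue : ((((n-1:Nat)):Int) == ((n-1:Nat):Int)) = true := by
          rw [beq_iff_eq]
        simp only [htrue, if_true]
        congr 1
        rw [show (47:Int) = ((47:Nat):Int) from rfl]
        exact aux_row_eq _ Prob 47 ((n:Int) * 112 + 64) (((n-1:Nat):Int) * 48) (by ring)
    · -- count
      rw [hsplitn, List.foldl_append]
      rw [aux_outer_skip Prob ((n-1:Nat):Int) (n-1)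
        (by
          intro x hx
          obtain ⟨_, hx2⟩ := PySem.List.mem_pyRange_one.mp hx
          rw [beq_eq_false_iff_ne]
          omega)]
      simp only [List.foldl_cons, List.foldl_nil]
      rw [aux_skiprow]
      rw [max_eq_left (by omega : (0:Int) ≤ (n:Int) * 48 - 1)]
      rw [← hcast]
      ring

-- ===== VERDICT (by name: the statement is the Claim_ definition above) =====
theorem GenerateAndCountVariables_spec : Claim_equal_GenerateAndCountVariables := by
  intro Round TotalProbability Probability _hdom hpre
  unfold Spec_GenerateAndCountVariables
  exact main_eq Round TotalProbability Probability hpre
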